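-- pv_equiv track=rewrite | github.com/riccardotorre/DNNLikelihood_dev | source/DNNLikelihood/utils.py | define_pars_labels_auto
-- ===== SOURCE A (Python) =====
-- def define_pars_labels_auto(pars_pos_poi, pars_pos_nuis):
--     pars_labels_auto = []
--     i_poi = 1
--     i_nuis = 1
--     for i in range(len(pars_pos_poi)+len(pars_pos_nuis)):
--         if i in pars_pos_poi:
--             pars_labels_auto.append(r"$\theta_{%d}$" % i_poi)
--             i_poi = i_poi+1
--         else:
--             pars_labels_auto.append(r"$\nu_{%d}$" % i_nuis)
--             i_nuis = i_nuis+1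
--     return pars_labels_auto
-- ===== SOURCE B (Python) =====
-- def define_pars_labels_auto(pars_pos_poi, pars_pos_nuis):
--     n = len(pars_pos_poi) + len(pars_pos_nuis)
--     poi = set(pars_pos_poi)
--     poi_idx = [i for i in range(n) if i in poi]
--     nuis_idx = [i for i in range(n) if i not in poi]
--     return [r"$\theta_{%d}$" % (poi_idx.index(i) + 1) if i in poi
--             else r"$\nu_{%d}$" % (nuis_idx.index(i) + 1)
--             for i in range(n)]
-- ===== Notes on version B (the rewrite author's own statement) =====
-- stated objective: alternative
-- what changed: Replaces the single interleaved scan carrying two mutable counters with a partition of range(n) into POI/nuisance index lists (set membership built once) and a rank lookup by position in each partition, assembled in one comprehension.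
import Mathlib
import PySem

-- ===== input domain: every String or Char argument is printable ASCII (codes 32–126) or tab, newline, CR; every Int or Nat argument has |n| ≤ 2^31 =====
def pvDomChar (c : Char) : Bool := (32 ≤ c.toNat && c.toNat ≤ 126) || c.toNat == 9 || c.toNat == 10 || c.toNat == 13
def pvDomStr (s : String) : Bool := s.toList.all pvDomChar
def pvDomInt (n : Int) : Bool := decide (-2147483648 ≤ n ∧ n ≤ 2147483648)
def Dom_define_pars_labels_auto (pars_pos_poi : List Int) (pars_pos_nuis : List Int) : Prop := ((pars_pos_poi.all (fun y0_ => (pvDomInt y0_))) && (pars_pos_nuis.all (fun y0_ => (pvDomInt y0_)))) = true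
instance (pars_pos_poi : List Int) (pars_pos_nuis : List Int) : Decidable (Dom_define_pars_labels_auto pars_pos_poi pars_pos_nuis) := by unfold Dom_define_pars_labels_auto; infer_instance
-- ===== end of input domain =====

-- B replaces A's interleaved counter scan by partitioning range(n) into POI/nuisance
-- index lists (set membership built once) and looking each rank up by its position in
-- its partition (objective: alternative decomposition, same practical cost).

-- r"$\theta_{%d}$" % k  /  r"$\nu_{%d}$" % k  (shared formatting helper, incidental to both algorithms)
def pvThetaLabel (k : Int) : String := "$\\theta_{" ++ PySem.Int.toStr k ++ "}$"
def pvNuLabel (k : Int) : String := "$\\nu_{" ++ PySem.Int.toStr k ++ "}$"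

-- ===== PORT A =====
def define_pars_labels_auto (pars_pos_poi : List Int) (pars_pos_nuis : List Int) : List String :=
  ((PySem.List.pyRange 0 ((pars_pos_poi.length : Int) + (pars_pos_nuis.length : Int)) 1).foldl
    (fun (st : List String × Int × Int) (i : Int) =>
      if pars_pos_poi.contains i then
        (st.1 ++ [pvThetaLabel st.2.1], st.2.1 + 1, st.2.2)
      else
        (st.1 ++ [pvNuLabel st.2.2], st.2.1, st.2.2 + 1))
    ([], 1, 1)).1

-- ===== PORT B =====
def define_pars_labels_auto_alt (pars_pos_poi : List Int) (pars_pos_nuis : List Int) : List String :=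
  let n : Int := (pars_pos_poi.length : Int) + (pars_pos_nuis.length : Int)
  let poi : PySem.Set Int := PySem.Set.ofList pars_pos_poi
  let poi_idx := (PySem.List.pyRange 0 n 1).filter (fun i => PySem.Set.contains poi i)
  let nuis_idx := (PySem.List.pyRange 0 n 1).filter (fun i => !PySem.Set.contains poi i)
  (PySem.List.pyRange 0 n 1).map (fun i =>
    if PySem.Set.contains poi i then
      pvThetaLabel (((PySem.List.index? poi_idx i).getD 0 : Int) + 1)
    else
      pvNuLabel (((PySem.List.index? nuis_idx i).getD 0 : Int) + 1))

-- ===== PRECONDITION & SPEC =====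
def Spec_define_pars_labels_auto (pars_pos_poi : List Int) (pars_pos_nuis : List Int) (out : List String) : Prop := out = define_pars_labels_auto_alt pars_pos_poi pars_pos_nuis
instance (pars_pos_poi : List Int) (pars_pos_nuis : List Int) (out : List String) : Decidable (Spec_define_pars_labels_auto pars_pos_poi pars_pos_nuis out) := by unfold Spec_define_pars_labels_auto; infer_instance

-- ===== CLAIM (what is proved, stated in full; the proofs are below) =====
def Claim_equal_define_pars_labels_auto : Prop := ∀ (pars_pos_poi : List Int) (pars_pos_nuis : List Int), Dom_define_pars_labels_auto pars_pos_poi pars_pos_nuis → Spec_define_pars_labels_auto pars_pos_poi pars_pos_nuis (define_pars_labels_auto pars_pos_poi pars_pos_nuis)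

-- ===== LEMMAS AND PROOFS =====

-- A's loop body, as a structural recursion on the remaining indices with the two counters.
def pvG (pred : Int → Bool) : List Int → Int → Int → List String
  | [], _, _ => []
  | i :: t, p, q =>
    if pred i then pvThetaLabel p :: pvG pred t (p + 1) q
    else pvNuLabel q :: pvG pred t p (q + 1)

theorem pvFoldl_eq_pvG (pred : Int → Bool) (l : List Int) (acc : List String) (p q : Int) :
    (l.foldl (fun (st : List String × Int × Int) (i : Int) =>
      if pred i then (st.1 ++ [pvThetaLabel st.2.1], st.2.1 + 1, st.2.2)
      else (st.1 ++ [pvNuLabel st.2.2], st.2.1, st.2.2 + 1)) (acc, p, q)).1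
    = acc ++ pvG pred l p q := by
  induction l generalizing acc p q with
  | nil => simp [pvG]
  | cons i t ih =>
    by_cases h : pred i <;> simp [pvG, h, ih]

theorem pvG_append (pred : Int → Bool) (l1 l2 : List Int) (p q : Int) :
    pvG pred (l1 ++ l2) p q
    = pvG pred l1 p q ++ pvG pred l2 (p + (l1.countP pred : Int)) (q + (l1.countP (fun i => !pred i) : Int)) := by
  induction l1 generalizing p q with
  | nil => simp [pvG]
  | cons i t ih =>
    by_cases h : pred i <;>
      simp [pvG, h, ih] <;> ring_nf

-- position of i in the filtered range = number of earlier hits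
theorem pvIndex_filter_range (pred : Int → Bool) (n : Nat) (i : Int)
    (hi : i ∈ PySem.List.pyRange 0 (n : Int) 1) (hp : pred i = true) :
    PySem.List.index? ((PySem.List.pyRange 0 (n : Int) 1).filter pred) i
      = some ((PySem.List.pyRange 0 i 1).countP pred) := by
  induction n with
  | zero =>
    rw [PySem.List.mem_pyRange_one] at hi
    omega
  | succ m ih =>
    have hsplit : PySem.List.pyRange 0 ((m + 1 : Nat) : Int) 1
        = PySem.List.pyRange 0 (m : Int) 1 ++ [(m : Int)] := by
      push_cast
      exact PySem.List.pyRange_one_succ_right (by positivity)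
    rw [PySem.List.mem_pyRange_one] at hi
    by_cases hlt : i < (m : Int)
    · have hmem : i ∈ PySem.List.pyRange 0 (m : Int) 1 := by
        rw [PySem.List.mem_pyRange_one]; omega
      have hmemf : i ∈ (PySem.List.pyRange 0 (m : Int) 1).filter pred :=
        List.mem_filter.mpr ⟨hmem, hp⟩
      rw [hsplit, List.filter_append, PySem.List.index?_append_of_mem _ hmemf]
      exact ih hmem
    · have hieq : i = (m : Int) := by omega
      have hnot : i ∉ (PySem.List.pyRange 0 i 1).filter pred := by
        intro hmem
        have := (List.mem_filter.mp hmem).1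
        rw [PySem.List.mem_pyRange_one] at this
        omega
      rw [hsplit, ← hieq]
      have hfil : (PySem.List.pyRange 0 i 1 ++ [i]).filter pred
          = (PySem.List.pyRange 0 i 1).filter pred ++ [i] := by
        simp [List.filter_append, hp]
      rw [hfil, PySem.List.index?_append_singleton_self _ i hnot]
      simp [← List.countP_eq_length_filter]

-- the canonical value at position i (counts over range(i); independent of n)
def pvLabel (pred : Int → Bool) (i : Int) : String :=
  if pred i then pvThetaLabel (((PySem.List.pyRange 0 i 1).countP pred : Int) + 1)
  else pvNuLabel (((PySem.List.pyRange 0 i 1).countP (fun j => !pred j) : Int) + 1)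

theorem pvG_range_eq_map (pred : Int → Bool) (n : Nat) :
    pvG pred (PySem.List.pyRange 0 (n : Int) 1) 1 1
      = (PySem.List.pyRange 0 (n : Int) 1).map (pvLabel pred) := by
  induction n with
  | zero => simp [pvG]
  | succ m ih =>
    have hsplit : PySem.List.pyRange 0 ((m + 1 : Nat) : Int) 1
        = PySem.List.pyRange 0 (m : Int) 1 ++ [(m : Int)] := by
      push_cast
      exact PySem.List.pyRange_one_succ_right (by positivity)
    rw [hsplit, pvG_append, List.map_append, ih]
    congr 1
    by_cases h : pred (m : Int) <;>
      simp [pvG, h, pvLabel, add_comm]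

theorem pvSet_contains_eq (xs : List Int) (i : Int) :
    PySem.Set.contains (PySem.Set.ofList xs) i = xs.contains i := by
  simp [PySem.Set.contains, PySem.Set.mem_ofList]

-- ===== VERDICT (by name: the statement is the Claim_ definition above) =====
theorem define_pars_labels_auto_spec : Claim_equal_define_pars_labels_auto := by
  intro poi nuis _
  unfold Spec_define_pars_labels_auto define_pars_labels_auto define_pars_labels_auto_alt
  simp only [pvSet_contains_eq]
  have hcast : (poi.length : Int) + (nuis.length : Int) = ((poi.length + nuis.length : Nat) : Int) := by
    push_cast; ring
  rw [hcast, pvFoldl_eq_pvG (fun i => poi.contains i), List.nil_append,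
    pvG_range_eq_map (fun i => poi.contains i)]
  apply List.map_congr_left
  intro i hi
  by_cases h : poi.contains i
  · have hmem : i ∈ poi := List.contains_iff_mem.mp h
    rw [pvIndex_filter_range (fun j => poi.contains j) _ i hi h]
    simp [pvLabel, hmem]
  · have hmem : i ∉ poi := fun hm => h (List.contains_iff_mem.mpr hm)
    have h' : (fun j => !(poi.contains j)) i = true := by
      simp [hmem]
    rw [pvIndex_filter_range (fun j => !(poi.contains j)) _ i hi h']
    simp [pvLabel, hmem]
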